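-- pv_equiv track=rewrite | github.com/amitvakula/python-cli | cli/util.py | str_to_python_id
-- ===== SOURCE A (Python) =====
-- import string
--
-- def str_to_python_id(val):
--     """Convert a string to a valid python id in a reversible way
--
--     Arguments:
--         val (str): The value to convert
--
--     Returns:
--         str: The valid python id
--     """
--     result = ''
--     for c in val:
--         if c in string.ascii_letters or c == '_':
--             result = result + c
--         else:
--             result = result + '__{0:02x}__'.format(ord(c))
--     return result
-- ===== SOURCE B (Python) =====
-- import re
--
-- _ESCAPE_RE = re.compile(r'[^a-zA-Z_]')
--
-- def str_to_python_id(val):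
--     """Convert a string to a valid python id in a reversible way"""
--     return _ESCAPE_RE.sub(lambda m: '__{0:02x}__'.format(ord(m.group(0))), val)
-- ===== Notes on version B (the rewrite author's own statement) =====
-- stated objective: idiomatic
-- what changed: Replaced the explicit per-character loop with string-concatenation accumulator by a single re.sub over the class [^a-zA-Z_] with a callback producing the same __<hex>__ escape.
import Mathlib
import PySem

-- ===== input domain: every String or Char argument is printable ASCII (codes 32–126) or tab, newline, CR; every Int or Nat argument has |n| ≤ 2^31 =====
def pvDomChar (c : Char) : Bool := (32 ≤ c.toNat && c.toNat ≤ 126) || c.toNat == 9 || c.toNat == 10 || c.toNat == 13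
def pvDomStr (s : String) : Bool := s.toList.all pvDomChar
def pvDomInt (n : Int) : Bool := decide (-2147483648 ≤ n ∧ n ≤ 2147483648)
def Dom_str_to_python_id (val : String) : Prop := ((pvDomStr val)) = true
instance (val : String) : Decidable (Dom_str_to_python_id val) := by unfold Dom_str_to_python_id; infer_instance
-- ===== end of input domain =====

-- B replaces A's explicit per-character loop (string-concatenation accumulator) by a single
-- regex substitution over the class [^a-zA-Z_] with a callback producing the same __<hex>__ escape.

-- shared helper: '{0:02x}'.format(ord(c)); exact for code points ≤ 255 (Dom admits only ≤ 126)
def pvHexDigit (n : Nat) : Char := if n < 10 then Char.ofNat (48 + n) else Char.ofNat (87 + n)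
def pvEscHex (c : Char) : List Char :=
  ['_', '_', pvHexDigit (c.toNat / 16 % 16), pvHexDigit (c.toNat % 16), '_', '_']

-- ===== PORT A =====
def pvAsciiLetters : List Char :=
  "abcdefghijklmnopqrstuvwxyzABCDEFGHIJKLMNOPQRSTUVWXYZ".toList

def str_to_python_id (val : String) : String :=
  String.mk (val.toList.foldl (fun result c =>
    if c ∈ pvAsciiLetters ∨ c = '_' then result ++ [c] else result ++ pvEscHex c) [])

-- ===== PORT B =====
-- the regex class [^a-zA-Z_]: unmatched characters pass through, matched ones are replaced by the callback
def str_to_python_id_alt (val : String) : String :=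
  String.mk (val.toList.flatMap (fun c =>
    if (97 ≤ c.toNat ∧ c.toNat ≤ 122) ∨ (65 ≤ c.toNat ∧ c.toNat ≤ 90) ∨ c.toNat = 95
    then [c] else pvEscHex c))

-- ===== PRECONDITION & SPEC =====
def Spec_str_to_python_id (val : String) (out : String) : Prop := out = str_to_python_id_alt val
instance (val : String) (out : String) : Decidable (Spec_str_to_python_id val out) := by unfold Spec_str_to_python_id; infer_instance

-- ===== CLAIM (what is proved, stated in full; the proofs are below) =====
def Claim_equal_str_to_python_id : Prop := ∀ (val : String), Dom_str_to_python_id val → Spec_str_to_python_id val (str_to_python_id val)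

-- ===== LEMMAS AND PROOFS =====
theorem pv_cond_iff (c : Char) :
    (c ∈ pvAsciiLetters ∨ c = '_') ↔
    ((97 ≤ c.toNat ∧ c.toNat ≤ 122) ∨ (65 ≤ c.toNat ∧ c.toNat ≤ 90) ∨ c.toNat = 95) := by
  have h : ∀ d : Char, c = d ↔ c.toNat = d.toNat := by
    intro d
    constructor
    · rintro rfl; rfl
    · intro e; exact Char.ext (UInt32.toNat_inj.mp e)
  have hlist : pvAsciiLetters = ['a', 'b', 'c', 'd', 'e', 'f', 'g', 'h', 'i', 'j', 'k', 'l', 'm', 'n', 'o', 'p', 'q', 'r', 's', 't', 'u', 'v', 'w', 'x', 'y', 'z', 'A', 'B', 'C', 'D', 'E', 'F', 'G', 'H', 'I', 'J', 'K', 'L', 'M', 'N', 'O', 'P', 'Q', 'R', 'S', 'T', 'U', 'V', 'W', 'X', 'Y', 'Z'] := by decide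
  simp [hlist, h]
  omega

-- ===== VERDICT (by name: the statement is the Claim_ definition above) =====
theorem str_to_python_id_spec : Claim_equal_str_to_python_id := by
  intro val _
  unfold Spec_str_to_python_id str_to_python_id str_to_python_id_alt
  congr 1
  have hstep : (fun (result : List Char) (c : Char) =>
        if c ∈ pvAsciiLetters ∨ c = '_' then result ++ [c] else result ++ pvEscHex c)
      = fun result c => result ++
          (if (97 ≤ c.toNat ∧ c.toNat ≤ 122) ∨ (65 ≤ c.toNat ∧ c.toNat ≤ 90) ∨ c.toNat = 95
           then [c] else pvEscHex c) := by
    funext r c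
    by_cases h : c ∈ pvAsciiLetters ∨ c = '_'
    · rw [if_pos h, if_pos ((pv_cond_iff c).mp h)]
    · rw [if_neg h, if_neg (fun hb => h ((pv_cond_iff c).mpr hb))]
  rw [hstep, PySem.List.foldl_append_eq_flatMap, List.nil_append]
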